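-- pv_equiv track=rewrite | github.com/JoshuaBilsland/tkinter-four-function-calculator | shuntingYard.py | getTokenizedInfix
-- ===== SOURCE A (Python) =====
-- def getTokenizedInfix(infixExpression):
--     # Creates a list of each token (complete number and operators such as ['28', '+', '2'])
--     tokenized = []
--     currentNumber = "" # Store each complete number as a string
--
--     for char in str(infixExpression):
--         try:
--             int(char)
--         except ValueError:
--             if char == ".":
--                 # currentNumber must be a float, so add the decimal
--                 currentNumber += "."
--             else:
--                 # char is an operator, end of the currentNumber and the operator is added as a separate token
--                 if currentNumber != "":
--                     tokenized.append(currentNumber)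
--                     currentNumber = ""
--                 if char != " ":
--                     tokenized.append(char)
--         else:
--             # Char is a digit, the number continues so add the current digit to currentNumber
--             currentNumber += char
--
--     if len(currentNumber) != 0: # End of the expression reached. If currentNumber has anything stored, it must be a complete number so append it
--         tokenized.append(currentNumber)
--
--     return tokenized
-- ===== SOURCE B (Python) =====
-- def getTokenizedInfix(infixExpression):
--     # Run-grouping tokenizer: scan maximal runs of number characters with two
--     # indices and slice them out; every other non-space char is its own token.
--     s = str(infixExpression)
--
--     def isNumberChar(c):
--         if c == ".":
--             return True
--         try:
--             int(c)
--             return True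
--         except ValueError:
--             return False
--
--     tokens = []
--     i, n = 0, len(s)
--     while i < n:
--         c = s[i]
--         if isNumberChar(c):
--             j = i + 1
--             while j < n and isNumberChar(s[j]):
--                 j += 1
--             tokens.append(s[i:j])
--             i = j
--         else:
--             if c != " ":
--                 tokens.append(c)
--             i += 1
--     return tokens
-- ===== Notes on version B (the rewrite author's own statement) =====
-- stated objective: alternative
-- what changed: Replaced the running-accumulator state machine (append-per-digit plus flush bookkeeping) with a two-index run-grouping scan that slices out each maximal run of number characters as one token.
import Mathlib
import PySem

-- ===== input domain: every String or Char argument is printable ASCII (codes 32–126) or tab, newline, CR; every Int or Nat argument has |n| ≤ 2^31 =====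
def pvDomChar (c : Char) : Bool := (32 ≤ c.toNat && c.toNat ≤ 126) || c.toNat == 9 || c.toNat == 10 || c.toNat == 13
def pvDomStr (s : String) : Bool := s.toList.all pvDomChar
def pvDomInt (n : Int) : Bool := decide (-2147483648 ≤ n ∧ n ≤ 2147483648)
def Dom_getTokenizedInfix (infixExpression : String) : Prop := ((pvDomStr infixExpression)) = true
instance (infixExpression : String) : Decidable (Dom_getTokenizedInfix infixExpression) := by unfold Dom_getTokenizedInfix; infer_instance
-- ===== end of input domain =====

-- B replaces A's running-accumulator state machine with a two-index run-grouping
-- scan over maximal runs of number characters; same tokens, alternative decomposition.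

-- ===== PORT A =====
-- int(char) succeeds exactly when PySem.Int.ofStr? returns some
def pvIsDigit (c : Char) : Bool := (PySem.Int.ofStr? (String.mk [c])).isSome

-- the for-loop: state = (tokenized, currentNumber as list of chars)
def aLoop : List Char → List String → List Char → List String
  | [], tokenized, currentNumber =>
      if currentNumber.length ≠ 0 then tokenized ++ [String.mk currentNumber] else tokenized
  | c :: cs, tokenized, currentNumber =>
      if pvIsDigit c then
        -- int(char) succeeded: the number continues
        aLoop cs tokenized (currentNumber ++ [c])
      else if c = '.' then
        aLoop cs tokenized (currentNumber ++ ['.'])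
      else
        let tok1 := if currentNumber ≠ [] then tokenized ++ [String.mk currentNumber] else tokenized
        let tok2 := if c ≠ ' ' then tok1 ++ [String.mk [c]] else tok1
        aLoop cs tok2 []

def getTokenizedInfix (infixExpression : String) : List String :=
  aLoop infixExpression.toList [] []

-- ===== PORT B =====
def isNumberChar (c : Char) : Bool := c == '.' || pvIsDigit c

-- the outer while loop; the inner while loop (advancing j over number chars)
-- is the takeWhile/dropWhile pair, the slice s[i:j] is the taken run
def bRun : List Char → List String
  | [] => []
  | c :: cs =>
      if isNumberChar c then
        String.mk (c :: cs.takeWhile isNumberChar) :: bRun (cs.dropWhile isNumberChar)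
      else if c = ' ' then bRun cs
      else String.mk [c] :: bRun cs
termination_by l => l.length
decreasing_by
  · exact Nat.lt_succ_of_le (List.length_dropWhile_le _ _)
  · simp
  · simp

def getTokenizedInfix_alt (infixExpression : String) : List String :=
  bRun infixExpression.toList

-- ===== PRECONDITION & SPEC =====
def Spec_getTokenizedInfix (infixExpression : String) (out : List String) : Prop := out = getTokenizedInfix_alt infixExpression
instance (infixExpression : String) (out : List String) : Decidable (Spec_getTokenizedInfix infixExpression out) := by unfold Spec_getTokenizedInfix; infer_instance

-- ===== CLAIM (what is proved, stated in full; the proofs are below) =====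
def Claim_equal_getTokenizedInfix : Prop := ∀ (infixExpression : String), Dom_getTokenizedInfix infixExpression → Spec_getTokenizedInfix infixExpression (getTokenizedInfix infixExpression)

-- ===== LEMMAS AND PROOFS =====

-- ===== VERDICT (by name: the statement is the Claim_ definition above) =====
-- appending to the accumulator commutes with prefixing already-emitted tokens
lemma aLoop_append (cs : List Char) : ∀ (t1 t2 : List String) (cur : List Char),
    aLoop cs (t1 ++ t2) cur = t1 ++ aLoop cs t2 cur := by
  induction cs with
  | nil => intro t1 t2 cur; simp [aLoop]; split <;> simp
  | cons c cs ih =>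
      intro t1 t2 cur
      simp only [aLoop]
      split
      · exact ih t1 t2 _
      · split
        · exact ih t1 t2 _
        · split_ifs <;>
            (try simp only [List.append_assoc]) <;> exact ih t1 _ []

-- the run/rest decomposition lemma for bRun (no induction needed)
lemma bRun_runs (cs : List Char) :
    (if cs.takeWhile isNumberChar = [] then ([] : List String)
     else [String.mk (cs.takeWhile isNumberChar)]) ++ bRun (cs.dropWhile isNumberChar)
      = bRun cs := by
  cases cs with
  | nil => simp [bRun]
  | cons c cs =>
      by_cases h : isNumberChar c = true
      · simp [List.takeWhile, List.dropWhile, h, bRun]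
      · simp [List.takeWhile, List.dropWhile, h, bRun]

-- main invariant: aLoop with empty token list emits the pending number joined
-- with the leading numeric run, then behaves like bRun on the rest
lemma aLoop_spec (cs : List Char) : ∀ (cur : List Char),
    aLoop cs [] cur =
      (if cur ++ cs.takeWhile isNumberChar = [] then ([] : List String)
       else [String.mk (cur ++ cs.takeWhile isNumberChar)]) ++ bRun (cs.dropWhile isNumberChar) := by
  induction cs with
  | nil =>
      intro cur
      simp only [aLoop, List.takeWhile, List.dropWhile, bRun, List.append_nil]
      split <;> simp_all
  | cons c cs ih =>
      intro cur
      by_cases hd : pvIsDigit c = true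
      · have hn : isNumberChar c = true := by simp [isNumberChar, hd]
        simp only [aLoop, hd, if_pos, List.takeWhile_cons, List.dropWhile_cons, hn]
        rw [ih (cur ++ [c])]
        simp
      · by_cases hdot : c = '.'
        · have hn : isNumberChar c = true := by simp [isNumberChar, hdot]
          subst hdot
          simp only [aLoop, hd, if_neg, if_pos, Bool.not_eq_true, List.takeWhile_cons,
            List.dropWhile_cons, hn]
          rw [ih (cur ++ ['.'])]
          simp
        · have hn : isNumberChar c = false := by simp [isNumberChar, hd, hdot]
          simp only [aLoop, hd, hdot, Bool.false_eq_true, List.takeWhile_cons,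
            List.dropWhile_cons, hn, if_false]
          rw [show ∀ t : List String, aLoop cs t [] = aLoop cs (t ++ []) [] from fun t => by simp,
            aLoop_append, ih []]
          simp only [List.nil_append]
          rw [bRun_runs]
          by_cases hsp : c = ' '
          · subst hsp
            by_cases hc : cur = [] <;> simp [bRun, hn, hc]
          · by_cases hc : cur = [] <;> simp [bRun, hn, hsp, hc]

theorem getTokenizedInfix_spec : Claim_equal_getTokenizedInfix := by
  intro s _
  show getTokenizedInfix s = getTokenizedInfix_alt s
  unfold getTokenizedInfix getTokenizedInfix_alt
  rw [aLoop_spec]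
  simpa using bRun_runs s.toList
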